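-- pv_equiv track=rewrite | github.com/ddaynew365/codingtest | 리트코드/이진탐색.py | getMaxBarrier
-- ===== SOURCE A (Python) =====
-- def getMaxBarrier(initialEnergy, th):
--     # Write your code here
--     lo = 1
--     hi = max(initialEnergy)
--     while lo <= hi:
--         mid = (hi + lo) // 2
--         resultEnergy = list(map(lambda x: x- mid, initialEnergy))
--         total = sum([x for x in resultEnergy if x > 0])
--         if total > th:
--             lo = mid + 1
--         elif total < th:
--             hi = mid - 1
--         else:
--             return mid
--     return hi
-- ===== SOURCE B (Python) =====
-- def getMaxBarrier(initialEnergy, th):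
--     xs = sorted(initialEnergy)
--     n = len(xs)
--     suf = [0] * (n + 1)
--     for i in range(n - 1, -1, -1):
--         suf[i] = suf[i + 1] + xs[i]
--
--     def count_le(v):  # number of elements <= v (bisect_right, hand-rolled)
--         a, b = 0, n
--         while a < b:
--             m = (a + b) // 2
--             if xs[m] <= v:
--                 a = m + 1
--             else:
--                 b = m
--         return a
--
--     lo = 1
--     hi = xs[-1]
--     while lo <= hi:
--         mid = (lo + hi) // 2
--         k = count_le(mid)
--         total = suf[k] - (n - k) * mid
--         if total > th:
--             lo = mid + 1
--         elif total < th: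
--             hi = mid - 1
--         else:
--             return mid
--     return hi
-- ===== Notes on version B (the rewrite author's own statement) =====
-- stated objective: faster
-- what changed: B keeps the same outer binary search on the barrier (so tie-breaking is identical) but replaces A's per-step O(n) rescan (map, filter, sum over the whole list) by a one-time sort with a suffix-sum table, evaluating each candidate barrier's surplus in O(log n) by a hand-rolled bisect.
import Mathlib
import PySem

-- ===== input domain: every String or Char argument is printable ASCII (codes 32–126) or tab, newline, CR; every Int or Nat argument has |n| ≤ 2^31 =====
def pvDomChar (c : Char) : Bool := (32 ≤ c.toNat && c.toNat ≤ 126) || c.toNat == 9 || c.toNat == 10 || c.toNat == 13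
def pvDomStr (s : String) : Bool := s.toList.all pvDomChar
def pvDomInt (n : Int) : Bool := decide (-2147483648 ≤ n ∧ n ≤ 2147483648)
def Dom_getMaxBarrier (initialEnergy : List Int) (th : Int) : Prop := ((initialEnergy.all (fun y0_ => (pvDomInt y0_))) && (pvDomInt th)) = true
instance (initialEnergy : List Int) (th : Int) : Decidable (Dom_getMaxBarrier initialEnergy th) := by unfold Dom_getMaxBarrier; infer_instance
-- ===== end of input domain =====

-- B keeps A's outer binary search on the barrier (so it returns the same value, including
-- ties) but evaluates each step's surplus from a one-time sort + suffix-sum table via a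
-- hand-rolled bisect instead of rescanning the whole list (objective: faster).

-- ===== PORT A =====
-- A's while-loop: lo/hi binary search, recomputing the surplus by a full rescan each step.
def pvLoopA (initialEnergy : List Int) (th lo hi : Int) : Int :=
  if h : lo ≤ hi then
    let mid := PySem.Int.floordiv (hi + lo) 2
    let resultEnergy := initialEnergy.map (fun x => x - mid)
    let total := (resultEnergy.filter (fun x => 0 < x)).sum
    if total > th then pvLoopA initialEnergy th (mid + 1) hi
    else if total < th then pvLoopA initialEnergy th lo (mid - 1)
    else mid
  else hi
termination_by (hi - lo + 1).toNat
decreasing_by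
  · have := PySem.Int.floordiv_two_mid_bounds (lo := lo) (hi := hi) h
    simp only [Int.add_comm hi lo] at *
    omega
  · have := PySem.Int.floordiv_two_mid_bounds (lo := lo) (hi := hi) h
    simp only [Int.add_comm hi lo] at *
    omega

def getMaxBarrier (initialEnergy : List Int) (th : Int) : Int :=
  match PySem.List.max? initialEnergy (fun x => x) with
  | none => 0  -- Python raises ValueError here (max of empty list); excluded by Pre_
  | some m => pvLoopA initialEnergy th 1 m

-- ===== PORT B =====
-- suffix-sum table of Source B's backwards for-loop: suf[i] = xs[i] + suf[i+1], suf[n] = 0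
def pvSuf (xs : List Int) : List Int :=
  xs.foldr (fun x acc => (x + acc.headD 0) :: acc) [0]

-- Source B's hand-rolled bisect_right (count_le): number of elements ≤ v in the sorted list
def pvCountLe (xs : List Int) (v : Int) (a b : Nat) : Nat :=
  if h : a < b then
    let m := (a + b) / 2
    if xs.getD m 0 ≤ v then pvCountLe xs v (m + 1) b else pvCountLe xs v a m
  else a
termination_by b - a
decreasing_by all_goals omega

-- Source B's while-loop: the same lo/hi binary search, surplus read off the tables
def pvLoopB (xs suf : List Int) (th lo hi : Int) : Int :=
  if h : lo ≤ hi then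
    let mid := PySem.Int.floordiv (lo + hi) 2
    let k := pvCountLe xs mid 0 xs.length
    let total := suf.getD k 0 - ((xs.length : Int) - (k : Int)) * mid
    if total > th then pvLoopB xs suf th (mid + 1) hi
    else if total < th then pvLoopB xs suf th lo (mid - 1)
    else mid
  else hi
termination_by (hi - lo + 1).toNat
decreasing_by
  · have := PySem.Int.floordiv_two_mid_bounds (lo := lo) (hi := hi) h
    omega
  · have := PySem.Int.floordiv_two_mid_bounds (lo := lo) (hi := hi) h
    omega

def getMaxBarrier_alt (initialEnergy : List Int) (th : Int) : Int :=
  let xs := PySem.List.sorted initialEnergy (fun x => x) false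
  match PySem.List.pyGet? xs (-1) with
  | none => 0  -- Python raises IndexError here (xs[-1] of empty list); excluded by Pre_
  | some last => pvLoopB xs (pvSuf xs) th 1 last

-- ===== PRECONDITION & SPEC =====
-- A raises ValueError on the empty list (max(initialEnergy)); that is its only exception.
def Pre_getMaxBarrier (initialEnergy : List Int) (th : Int) : Prop := initialEnergy ≠ []
instance (initialEnergy : List Int) (th : Int) : Decidable (Pre_getMaxBarrier initialEnergy th) := by unfold Pre_getMaxBarrier; infer_instance
def pvWitness_getMaxBarrier : List Int × Int := ([5, 2, 7, 2], 3)

def Spec_getMaxBarrier (initialEnergy : List Int) (th : Int) (out : Int) : Prop := out = getMaxBarrier_alt initialEnergy th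
instance (initialEnergy : List Int) (th : Int) (out : Int) : Decidable (Spec_getMaxBarrier initialEnergy th out) := by unfold Spec_getMaxBarrier; infer_instance

-- ===== CLAIM (what is proved, stated in full; the proofs are below) =====
def Claim_equal_getMaxBarrier : Prop := ∀ (initialEnergy : List Int) (th : Int), Dom_getMaxBarrier initialEnergy th → Pre_getMaxBarrier initialEnergy th → Spec_getMaxBarrier initialEnergy th (getMaxBarrier initialEnergy th)

-- ===== LEMMAS AND PROOFS =====

theorem pvSuf_ne_nil (xs : List Int) : pvSuf xs ≠ [] := by
  induction xs with
  | nil => simp [pvSuf]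
  | cons x t ih => simp [pvSuf] at *

-- the suffix-sum table reads back the sum of the tail
theorem pvSuf_getD (xs : List Int) : ∀ (k : Nat), k ≤ xs.length → (pvSuf xs).getD k 0 = (xs.drop k).sum := by
  induction xs with
  | nil => intro k hk; have hk0 : k = 0 := by simpa using hk
           subst hk0; simp [pvSuf]
  | cons x t ih =>
    intro k hk
    cases k with
    | zero =>
      have h0 := ih 0 (by omega)
      have : (pvSuf t).headD 0 = t.sum := by
        cases h : pvSuf t with
        | nil => exact absurd h (pvSuf_ne_nil t)
        | cons a l => simpa [h] using h0
      simp [pvSuf, List.foldr] at *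
      omega
    | succ k =>
      have := ih k (by simpa using hk)
      simpa [pvSuf, List.foldr] using this

-- the hand-rolled bisect splits a sorted list at v
theorem pvCountLe_spec (xs : List Int) (hs : xs.Pairwise (· ≤ ·)) (v : Int) :
    ∀ (d a b : Nat), b - a ≤ d → a ≤ b → b ≤ xs.length →
    (∀ i (h : i < xs.length), i < a → xs[i] ≤ v) →
    (∀ i (h : i < xs.length), b ≤ i → v < xs[i]) →
    pvCountLe xs v a b ≤ xs.length ∧
    (∀ i (h : i < xs.length), i < pvCountLe xs v a b → xs[i] ≤ v) ∧
    (∀ i (h : i < xs.length), pvCountLe xs v a b ≤ i → v < xs[i]) := by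
  intro d
  induction d with
  | zero =>
    intro a b hd hab hb h1 h2
    have hba : ¬ a < b := by omega
    rw [pvCountLe]
    simp only [hba, dite_false]
    exact ⟨by omega, h1, fun i h hi => h2 i h (by omega)⟩
  | succ d ih =>
    intro a b hd hab hb h1 h2
    rw [pvCountLe]
    by_cases hba : a < b
    · simp only [hba, dite_true]
      set m := (a + b) / 2 with hm
      have hm1 : a ≤ m := by omega
      have hm2 : m < b := by omega
      have hmlt : m < xs.length := by omega
      by_cases hx : xs.getD m 0 ≤ v
      · simp only [hx, if_true]
        have hget : xs[m] ≤ v := by rwa [List.getD_eq_getElem _ _ hmlt] at hx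
        exact ih (m+1) b (by omega) (by omega) hb
          (fun i h hi => by
            rcases Nat.lt_or_ge i m with h' | h'
            · exact le_trans ((List.pairwise_iff_getElem.mp hs) i m h hmlt h') hget
            · have : i = m := by omega
              subst this; exact hget) h2
      · simp only [hx, if_false]
        have hget : v < xs[m] := by
          rw [List.getD_eq_getElem _ _ hmlt] at hx; omega
        refine ih a m (by omega) (by omega) (by omega) h1 ?_
        intro i h hi
        rcases Nat.lt_or_ge m i with h' | h'
        · exact lt_of_lt_of_le hget ((List.pairwise_iff_getElem.mp hs) m i hmlt h h')
        · have : i = m := by omega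
          subst this; exact hget
    · simp only [hba, dite_false]
      exact ⟨by omega, h1, fun i h hi => h2 i h (by omega)⟩

theorem filter_gt_eq_drop (xs : List Int) (v : Int) (k : Nat) (hk : k ≤ xs.length)
    (h1 : ∀ i (h : i < xs.length), i < k → xs[i] ≤ v)
    (h2 : ∀ i (h : i < xs.length), k ≤ i → v < xs[i]) :
    xs.filter (fun x => decide (v < x)) = xs.drop k := by
  conv_lhs => rw [← List.take_append_drop k xs]
  rw [List.filter_append]
  have ht : (xs.take k).filter (fun x => decide (v < x)) = [] := by
    rw [List.filter_eq_nil_iff]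
    intro a ha
    rw [List.mem_iff_getElem] at ha
    obtain ⟨i, hi, rfl⟩ := ha
    have hik : i < k := by simp at hi; omega
    have hil : i < xs.length := by omega
    rw [List.getElem_take]
    simpa using h1 i hil hik
  have hd : (xs.drop k).filter (fun x => decide (v < x)) = xs.drop k := by
    rw [List.filter_eq_self]
    intro a ha
    rw [List.mem_iff_getElem] at ha
    obtain ⟨i, hi, rfl⟩ := ha
    have hil : k + i < xs.length := by simp at hi; omega
    rw [List.getElem_drop]
    simpa using h2 (k+i) hil (by omega)
  rw [ht, hd, List.nil_append]

theorem sum_map_sub (l : List Int) (v : Int) : (l.map (fun x => x - v)).sum = l.sum - l.length * v := by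
  induction l with
  | nil => simp
  | cons x t ih => simp [ih]; ring

-- A's per-step rescan equals B's table lookup, for every candidate barrier v
theorem totals_agree (ys : List Int) (v : Int) :
    ((ys.map (fun x => x - v)).filter (fun x => decide (0 < x))).sum
      = (pvSuf (PySem.List.sorted ys (fun x => x) false)).getD
          (pvCountLe (PySem.List.sorted ys (fun x => x) false) v 0
            (PySem.List.sorted ys (fun x => x) false).length) 0
        - (((PySem.List.sorted ys (fun x => x) false).length : Int)
            - (pvCountLe (PySem.List.sorted ys (fun x => x) false) v 0
                (PySem.List.sorted ys (fun x => x) false).length : Int)) * v := by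
  set sxs := PySem.List.sorted ys (fun x => x) false with hsxs
  set k := pvCountLe sxs v 0 sxs.length with hk
  have hs : sxs.Pairwise (· ≤ ·) := PySem.List.sorted_pairwise ys (fun x => x)
  have hspec := pvCountLe_spec sxs hs v sxs.length 0 sxs.length (by omega) (by omega) (le_refl _)
    (fun i h hi => by omega) (fun i h hi => by omega)
  obtain ⟨hk1, hk2, hk3⟩ := hspec
  have hdrop : sxs.filter (fun x => decide (v < x)) = sxs.drop k := filter_gt_eq_drop sxs v k hk1 hk2 hk3
  have hperm : sxs.Perm ys := PySem.List.sorted_perm ys (fun x => x) false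
  rw [List.filter_map]
  have hpred : (ys.filter ((fun x => decide (0 < x)) ∘ (fun x => x - v))) = ys.filter (fun x => decide (v < x)) := by
    apply List.filter_congr
    intro x _
    simp
  rw [hpred, sum_map_sub]
  have hfperm : (ys.filter (fun x => decide (v < x))).Perm (sxs.filter (fun x => decide (v < x))) :=
    (hperm.filter _).symm
  rw [hfperm.sum_eq, hfperm.length_eq, hdrop]
  rw [pvSuf_getD sxs k hk1]
  have hlen : (sxs.drop k).length = sxs.length - k := by simp
  rw [hlen]
  have : ((sxs.length - k : Nat) : Int) = (sxs.length : Int) - (k : Int) := by omega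
  rw [this]

-- the two binary-search loops agree step for step
theorem loops_agree (ys : List Int) (th : Int) :
    ∀ (d : Nat) (lo hi : Int), (hi - lo + 1).toNat ≤ d →
    pvLoopA ys th lo hi
      = pvLoopB (PySem.List.sorted ys (fun x => x) false) (pvSuf (PySem.List.sorted ys (fun x => x) false)) th lo hi := by
  intro d
  induction d with
  | zero =>
    intro lo hi hd
    have h : ¬ lo ≤ hi := by omega
    rw [pvLoopA, pvLoopB]
    simp [h]
  | succ d ih =>
    intro lo hi hd
    rw [pvLoopA, pvLoopB]
    by_cases h : lo ≤ hi
    · simp only [h, dite_true]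
      have hmid := PySem.Int.floordiv_two_mid_bounds (lo := lo) (hi := hi) h
      rw [Int.add_comm hi lo]
      set mid := PySem.Int.floordiv (lo + hi) 2 with hm
      have htot := totals_agree ys mid
      simp only [← htot]
      split_ifs with h1 h2
      · exact ih (mid + 1) hi (by omega)
      · exact ih lo (mid - 1) (by omega)
      · rfl
    · simp [h]

-- max(ys) is the last element of sorted(ys)
theorem max_eq_sorted_last (ys : List Int) (m : Int)
    (hm : PySem.List.max? ys (fun x => x) = some m) :
    PySem.List.pyGet? (PySem.List.sorted ys (fun x => x) false) (-1) = some m := by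
  set sxs := PySem.List.sorted ys (fun x => x) false with hsxs
  have hne : ys ≠ [] := by
    intro h; subst h; simp [PySem.List.max?] at hm
  have hsne : sxs ≠ [] := by
    rw [hsxs, Ne, PySem.List.sorted_eq_nil_iff]; exact hne
  have hn : 1 ≤ sxs.length := List.length_pos_iff.mpr hsne
  have hl : sxs.length - 1 < sxs.length := by omega
  have hget : PySem.List.pyGet? sxs (-1) = some (sxs[sxs.length - 1]'hl) := by
    simp [PySem.List.pyGet?, PySem.List.pyIdx?, hn, List.getElem?_eq_getElem hl]
  rw [hget]
  congr 1
  have hperm : sxs.Perm ys := PySem.List.sorted_perm ys (fun x => x) false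
  have hmem : m ∈ sxs := hperm.mem_iff.mpr (PySem.List.max?_mem hm)
  obtain ⟨i, hi, hieq⟩ := List.mem_iff_getElem.mp hmem
  have h1 : m ≤ sxs[sxs.length - 1]'hl := by
    rw [← hieq]
    exact PySem.List.sorted_id_getElem_mono ys (by omega) (by omega)
  have h2 : sxs[sxs.length - 1]'hl ≤ m :=
    PySem.List.max?_isMax hm _ (hperm.mem_iff.mp (List.getElem_mem hl))
  omega

-- ===== VERDICT (by name: the statement is the Claim_ definition above) =====
theorem getMaxBarrier_spec : Claim_equal_getMaxBarrier := by
  intro initialEnergy th _hdom hpre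
  unfold Spec_getMaxBarrier
  simp only [getMaxBarrier, getMaxBarrier_alt]
  cases hm : PySem.List.max? initialEnergy (fun x => x) with
  | none => exact absurd ((PySem.List.max?_eq_none_iff _ _).mp hm) hpre
  | some m =>
    rw [max_eq_sorted_last initialEnergy m hm]
    exact loops_agree initialEnergy th (m - 1 + 1).toNat 1 m (by omega)
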